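-- pv_equiv track=rewrite | github.com/jeppeelb-ctrl/Thesis_plot | Number_of_Fans_Satisfying_SelfIntersection_Bound.py | convert_to_jupyter_ray_input
-- ===== SOURCE A (Python) =====
-- def convert_to_jupyter_ray_input(rays):
--     str_rays = str(rays)
--     str_rays = str_rays.replace("[","")
--     str_rays = str_rays.replace("]", "")
--     str_rays = str_rays.replace("(", "")
--     str_rays = str_rays.replace(")", "")
--     str_rays = str_rays.replace(" ", "")
--
--     elements = str_rays.split(",")
--     result = elements[0]
--     for i in range(1, len(elements)):
--         if i % 2 == 0:
--             result += ";" + elements[i]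
--         else:
--             result += "," + elements[i]
--
--     return result
-- ===== SOURCE B (Python) =====
-- def convert_to_jupyter_ray_input(rays):
--     return ";".join("%d,%d" % (a, b) for a, b in rays)
-- ===== Notes on version B (the rewrite author's own statement) =====
-- stated objective: simpler
-- what changed: B skips the stringify/strip-brackets/split/re-join pipeline entirely and directly joins each ray's two coordinates with ',' and the rays with ';' in one expression.
import Mathlib
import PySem

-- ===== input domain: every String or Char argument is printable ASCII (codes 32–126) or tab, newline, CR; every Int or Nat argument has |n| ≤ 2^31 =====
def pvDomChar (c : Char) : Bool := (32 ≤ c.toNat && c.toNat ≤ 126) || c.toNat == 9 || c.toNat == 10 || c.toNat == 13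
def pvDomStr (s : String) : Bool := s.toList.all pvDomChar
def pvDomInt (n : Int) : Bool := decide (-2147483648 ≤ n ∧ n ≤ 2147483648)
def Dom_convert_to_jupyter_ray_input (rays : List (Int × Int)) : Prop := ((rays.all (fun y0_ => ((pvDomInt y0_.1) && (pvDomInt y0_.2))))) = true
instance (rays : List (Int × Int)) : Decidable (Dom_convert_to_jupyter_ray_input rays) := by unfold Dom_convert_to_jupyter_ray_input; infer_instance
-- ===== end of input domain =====

-- B replaces A's stringify / strip-brackets / split / alternating re-join pipeline by directly
-- joining each ray's two coordinates with ',' and the rays with ';' (objective: simpler).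

-- ===== PORT A =====
-- Python's str() of a list of int pairs, built by hand: "[(a, b), (c, d)]" (exact for int tuples)
def pyStrPair (p : Int × Int) : List Char :=
  '(' :: (PySem.Int.toChars p.1 ++ ',' :: ' ' :: PySem.Int.toChars p.2 ++ [')'])

def pyStrRays (rays : List (Int × Int)) : List Char :=
  '[' :: (PySem.Chars.join [',', ' '] (rays.map pyStrPair) ++ [']'])

def convert_to_jupyter_ray_input (rays : List (Int × Int)) : String :=
  let s0 := pyStrRays rays
  let s1 := PySem.Chars.replace s0 ['['] []
  let s2 := PySem.Chars.replace s1 [']'] []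
  let s3 := PySem.Chars.replace s2 ['('] []
  let s4 := PySem.Chars.replace s3 [')'] []
  let s5 := PySem.Chars.replace s4 [' '] []
  let elements := PySem.Chars.splitOn s5 [',']
  -- elements[0]: split never returns an empty list, so the IndexError branch is unreachable
  let r0 := PySem.List.pyGetD elements 0 []
  let r := (PySem.List.pyRange 1 (elements.length : Int) 1).foldl
    (fun acc i =>
      acc ++ (if PySem.Int.mod i 2 == 0 then ';' else ',') :: PySem.List.pyGetD elements i []) r0
  String.ofList r

-- ===== PORT B =====
def convert_to_jupyter_ray_input_alt (rays : List (Int × Int)) : String :=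
  String.ofList (PySem.Chars.join [';']
    (rays.map (fun p => PySem.Int.toChars p.1 ++ ',' :: PySem.Int.toChars p.2)))

-- ===== PRECONDITION & SPEC =====
def Spec_convert_to_jupyter_ray_input (rays : List (Int × Int)) (out : String) : Prop := out = convert_to_jupyter_ray_input_alt rays
instance (rays : List (Int × Int)) (out : String) : Decidable (Spec_convert_to_jupyter_ray_input rays out) := by unfold Spec_convert_to_jupyter_ray_input; infer_instance

-- ===== CLAIM (what is proved, stated in full; the proofs are below) =====
def Claim_equal_convert_to_jupyter_ray_input : Prop := ∀ (rays : List (Int × Int)), Dom_convert_to_jupyter_ray_input rays → Spec_convert_to_jupyter_ray_input rays (convert_to_jupyter_ray_input rays)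

-- ===== LEMMAS AND PROOFS =====

-- the character class the five replaces keep
def pvKeep (c : Char) : Bool := (c != '[') && (c != ']') && (c != '(') && (c != ')') && (c != ' ')

-- the flat element list: the two coordinate strings of every ray
def pvFlat (rays : List (Int × Int)) : List (List Char) :=
  rays.flatMap (fun p => [PySem.Int.toChars p.1, PySem.Int.toChars p.2])

-- the loop's alternating re-join, index parity made structural
def pvAlt : Nat → List (List Char) → List Char
  | _, [] => []
  | k, e :: es => (if k % 2 == 0 then ';' else ',') :: (e ++ pvAlt (k + 1) es)

lemma toDigitsCore_digit (f : Nat) : ∀ (n : Nat) (ds : List Char),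
    (∀ c ∈ ds, c.isDigit = true) → ∀ c ∈ Nat.toDigitsCore 10 f n ds, c.isDigit = true := by
  induction f with
  | zero => intro n ds h; simpa [Nat.toDigitsCore] using h
  | succ f ih =>
    intro n ds h
    have hd : (Nat.digitChar (n % 10)).isDigit = true := by
      have h10 : n % 10 < 10 := by omega
      set m := n % 10 with hm
      interval_cases m <;> decide
    rw [Nat.toDigitsCore]
    split
    · intro c hc
      rcases List.mem_cons.mp hc with rfl | hc
      · exact hd
      · exact h c hc
    · exact ih _ _ (by
        intro c hc
        rcases List.mem_cons.mp hc with rfl | hc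
        · exact hd
        · exact h c hc)

lemma toChars_char (n : Int) : ∀ c ∈ PySem.Int.toChars n, c.isDigit = true ∨ c = '-' := by
  intro c hc
  unfold PySem.Int.toChars at hc
  split at hc
  · rcases List.mem_cons.mp hc with rfl | hc
    · exact Or.inr rfl
    · exact Or.inl (toDigitsCore_digit _ _ [] (by simp) c hc)
  · exact Or.inl (toDigitsCore_digit _ _ [] (by simp) c hc)

lemma keep_toChars (n : Int) : (PySem.Int.toChars n).filter pvKeep = PySem.Int.toChars n := by
  apply List.filter_eq_self.mpr
  intro c hc
  rcases toChars_char n c hc with h | rfl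
  · simp only [Char.isDigit] at h
    simp only [pvKeep, Bool.and_eq_true, bne_iff_ne, ne_eq]
    refine ⟨⟨⟨⟨?_, ?_⟩, ?_⟩, ?_⟩, ?_⟩ <;> (rintro rfl; revert h; decide)
  · decide

lemma comma_not_mem_toChars (n : Int) : ',' ∉ PySem.Int.toChars n := by
  intro h
  rcases toChars_char n ',' h with h' | h' <;> simp at h'

-- replace with a single-char pattern and empty replacement is a filter
lemma replace_go_single (c : Char) : ∀ (fuel : Nat) (l acc : List Char), l.length ≤ fuel →
    PySem.Chars.replace.go [c] [] fuel l acc = acc.reverse ++ l.filter (· != c) := by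
  intro fuel
  induction fuel with
  | zero =>
    intro l acc h
    have : l = [] := List.length_eq_zero_iff.mp (Nat.le_zero.mp h)
    subst this; rw [PySem.Chars.replace.go]; simp
  | succ f ih =>
    intro l acc h
    cases l with
    | nil => rw [PySem.Chars.replace.go]; simp; omega
    | cons x t =>
      rw [PySem.Chars.replace.go]
      by_cases hx : x = c
      · subst hx
        simp only [List.isPrefixOf, BEq.rfl, Bool.true_and, if_true,
          List.reverse_nil, List.nil_append]
        rw [show List.drop [x].length (x :: t) = t from rfl]
        rw [ih t acc (by simpa using h)]
        simp
      · have hp : ([c].isPrefixOf (x :: t)) = false := by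
          simp [List.isPrefixOf, Ne.symm hx]
        simp only [hp, Bool.false_eq_true, if_false]
        rw [ih t (x :: acc) (by simpa using h)]
        simp [hx]

lemma replace_single (s : List Char) (c : Char) :
    PySem.Chars.replace s [c] [] = s.filter (· != c) := by
  rw [PySem.Chars.replace]
  simp only [List.isEmpty_cons, Bool.false_eq_true, if_false]
  exact replace_go_single c s.length s [] le_rfl

-- splitOn with a single-char separator is Mathlib's List.splitOn
lemma splitOn_go_single (c : Char) : ∀ (fuel : Nat) (l cur : List Char) (acc : List (List Char)),
    l.length < fuel →
    PySem.Chars.splitOn.go [c] fuel l cur acc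
      = acc.reverse ++ (List.splitOn c l).modifyHead (cur.reverse ++ ·) := by
  intro fuel
  induction fuel with
  | zero => intro l cur acc h; omega
  | succ f ih =>
    intro l cur acc h
    cases l with
    | nil => rw [PySem.Chars.splitOn.go.eq_def]; simp
    | cons x t =>
      rw [PySem.Chars.splitOn.go.eq_def]
      by_cases hx : x = c
      · subst hx
        simp only [List.isPrefixOf, BEq.rfl, Bool.true_and, if_true]
        rw [show List.drop [x].length (x :: t) = t from rfl]
        rw [ih t [] (cur.reverse :: acc) (by simpa using h)]
        have h1 : List.splitOn x (x :: t) = [] :: List.splitOn x t := by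
          simp [List.splitOn, List.splitOnP_cons]
        rw [h1]
        cases hs : List.splitOn x t with
        | nil => exact absurd hs (List.splitOnP_ne_nil _ _)
        | cons y ys => simp
      · have hp : ([c].isPrefixOf (x :: t)) = false := by
          simp [List.isPrefixOf, Ne.symm hx]
        simp only [hp, Bool.false_eq_true, if_false]
        rw [ih t (x :: cur) acc (by simpa using h)]
        have h1 : List.splitOn c (x :: t) = (List.splitOn c t).modifyHead (x :: ·) := by
          simp [List.splitOn, List.splitOnP_cons, hx]
        rw [h1]
        cases hs : List.splitOn c t with
        | nil => exact absurd hs (List.splitOnP_ne_nil _ _)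
        | cons y ys => simp

lemma splitOn_single (s : List Char) (c : Char) :
    PySem.Chars.splitOn s [c] = List.splitOn c s := by
  rw [PySem.Chars.splitOn, splitOn_go_single c (s.length + 1) s [] [] (by omega)]
  cases hs : List.splitOn c s with
  | nil => exact absurd hs (List.splitOnP_ne_nil _ _)
  | cons y ys => simp

lemma intercalate_cons_flatMap {α : Type} (sep x : List α) (xs : List (List α)) :
    sep.intercalate (x :: xs) = x ++ xs.flatMap (fun y => sep ++ y) := by
  induction xs generalizing x with
  | nil => simp [List.intercalate]
  | cons b l ih =>
    have h2 : sep.intercalate (x :: b :: l) = x ++ sep ++ sep.intercalate (b :: l) := by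
      simp [List.intercalate, List.intersperse]
    rw [h2, ih b]
    simp

lemma flat_comma (rest : List (Int × Int)) :
    List.flatMap (fun y => [','] ++ y) (pvFlat rest)
      = List.flatMap (fun a => [','] ++ (PySem.Int.toChars a.1 ++ ',' :: PySem.Int.toChars a.2)) rest := by
  induction rest with
  | nil => rfl
  | cons q qs ihq => simp [pvFlat] at ihq ⊢; simp [ihq]

-- the five removals turn the printed list into the comma-joined flat element string
lemma clean_repr (rays : List (Int × Int)) :
    (pyStrRays rays).filter pvKeep = List.intercalate [','] (pvFlat rays) := by
  cases rays with
  | nil => decide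
  | cons p rest =>
    have h1 : pvKeep '[' = false := by decide
    have h2 : pvKeep ']' = false := by decide
    have hsep : List.filter pvKeep [',', ' '] = [','] := by decide
    have hpair : ∀ q : Int × Int, (pyStrPair q).filter pvKeep
        = PySem.Int.toChars q.1 ++ ',' :: PySem.Int.toChars q.2 := by
      intro q
      have h3 : pvKeep '(' = false := by decide
      have h4 : pvKeep ')' = false := by decide
      have h5 : pvKeep ',' = true := by decide
      have h6 : pvKeep ' ' = false := by decide
      simp [pyStrPair, List.filter_append, keep_toChars, h3, h4, h5, h6]
    have hflat : pvFlat (p :: rest)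
        = PySem.Int.toChars p.1 :: PySem.Int.toChars p.2 :: pvFlat rest := rfl
    rw [pyStrRays, hflat, intercalate_cons_flatMap, PySem.Chars.join, List.map_cons,
        intercalate_cons_flatMap]
    simp only [List.filter_cons, h1, h2, List.filter_append, List.filter_flatMap, hsep, hpair,
        List.flatMap_map, Bool.false_eq_true, if_false, pvFlat]
    rw [← flat_comma rest]
    simp
    rfl

-- the five successive single-character removals are one filter by pvKeep
lemma filters_eq (s : List Char) :
    (((((s.filter (· != '[')).filter (· != ']')).filter (· != '(')).filter
      (· != ')')).filter (· != ' ')) = s.filter pvKeep := by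
  induction s with
  | nil => rfl
  | cons c t ih =>
    by_cases e1 : c = '[' <;> by_cases e2 : c = ']' <;> by_cases e3 : c = '(' <;>
      by_cases e4 : c = ')' <;> by_cases e5 : c = ' ' <;>
      simp_all [pvKeep]

-- the loop over indices 1..len computes the alternating re-join of the dropped prefix
lemma fold_alt (full : List (List Char)) : ∀ (n k : Nat) (acc : List Char),
    full.length - k = n →
    (PySem.List.pyRange (k : Int) (full.length : Int) 1).foldl
      (fun a j => a ++ (if PySem.Int.mod j 2 == 0 then ';' else ',') :: PySem.List.pyGetD full j []) acc
      = acc ++ pvAlt k (full.drop k) := by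
  intro n
  induction n with
  | zero =>
    intro k acc h
    rw [PySem.List.pyRange_one_eq_nil (by exact_mod_cast Nat.le_of_sub_eq_zero h)]
    rw [List.drop_of_length_le (by omega)]
    simp [pvAlt]
  | succ m ih =>
    intro k acc h
    have hk : k < full.length := by omega
    rw [PySem.List.pyRange_one_cons (by exact_mod_cast hk), List.foldl_cons]
    have hg : PySem.List.pyGetD full (k : Int) [] = full[k] := by
      simp [PySem.List.pyGetD_natCast, List.getD_eq_getElem?_getD, hk]
    have hmod : (PySem.Int.mod (k : Int) 2 == 0) = (k % 2 == 0) := by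
      have hm : PySem.Int.mod (k : Int) 2 = ((k % 2 : Nat) : Int) := by
        exact_mod_cast PySem.Int.mod_natCast k 2
      rw [hm]
      cases h2 : k % 2 == 0 <;> simp_all
    have hcast : ((k : Int) + 1) = ((k + 1 : Nat) : Int) := by push_cast; ring
    rw [hg, hmod, hcast, ih (k + 1) _ (by omega)]
    rw [List.drop_eq_getElem_cons hk]
    simp [pvAlt]

-- from an even start the alternation groups the flat elements back into ';'-separated pairs
lemma alt_even : ∀ (rest : List (Int × Int)) (k : Nat), k % 2 = 0 →
    pvAlt k (pvFlat rest)
      = rest.flatMap (fun q => ';' :: (PySem.Int.toChars q.1 ++ ',' :: PySem.Int.toChars q.2)) := by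
  intro rest
  induction rest with
  | nil => intro k _; rfl
  | cons q qs ih =>
    intro k hk
    have hflat : pvFlat (q :: qs)
        = PySem.Int.toChars q.1 :: PySem.Int.toChars q.2 :: pvFlat qs := rfl
    rw [hflat]
    show (if k % 2 == 0 then ';' else ',') ::
        (PySem.Int.toChars q.1 ++ (if (k+1) % 2 == 0 then ';' else ',') ::
          (PySem.Int.toChars q.2 ++ pvAlt (k+2) (pvFlat qs))) = _
    have h1 : (k % 2 == 0) = true := by simp [hk]
    have h2 : ((k + 1) % 2 == 0) = false := by simp; omega
    have h3 : (k + 2) % 2 = 0 := by omega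
    rw [h1, h2, ih (k + 2) h3]
    simp

theorem pv_main (rays : List (Int × Int)) :
    convert_to_jupyter_ray_input rays = convert_to_jupyter_ray_input_alt rays := by
  cases rays with
  | nil => rfl
  | cons p rest =>
    unfold convert_to_jupyter_ray_input convert_to_jupyter_ray_input_alt
    have hclean : PySem.Chars.replace (PySem.Chars.replace (PySem.Chars.replace
        (PySem.Chars.replace (PySem.Chars.replace (pyStrRays (p :: rest)) ['['] []) [']'] [])
          ['('] []) [')'] []) [' '] []
        = List.intercalate [','] (pvFlat (p :: rest)) := by
      simp only [replace_single]
      rw [filters_eq, clean_repr]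
    have hel : PySem.Chars.splitOn (List.intercalate [','] (pvFlat (p :: rest))) [',']
        = pvFlat (p :: rest) := by
      rw [splitOn_single]
      apply List.splitOn_intercalate
      · intro l hl
        simp only [pvFlat, List.mem_flatMap, List.mem_cons,
          List.not_mem_nil, or_false] at hl
        obtain ⟨a, -, hl⟩ := hl
        rcases hl with rfl | rfl <;> exact comma_not_mem_toChars _
      · simp [pvFlat]
    simp only [hclean, hel]
    have hflat : pvFlat (p :: rest)
        = PySem.Int.toChars p.1 :: PySem.Int.toChars p.2 :: pvFlat rest := rfl
    have hfold := fold_alt (pvFlat (p :: rest)) ((pvFlat (p :: rest)).length - 1) 1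
      (PySem.List.pyGetD (pvFlat (p :: rest)) 0 []) rfl
    rw [Nat.cast_one] at hfold
    rw [hfold]
    rw [hflat]
    rw [PySem.List.pyGetD_zero_cons]
    rw [show (PySem.Int.toChars p.1 :: PySem.Int.toChars p.2 :: pvFlat rest).drop 1
      = PySem.Int.toChars p.2 :: pvFlat rest from rfl]
    show String.ofList (PySem.Int.toChars p.1 ++
        (if (1 : Nat) % 2 == 0 then ';' else ',') ::
          (PySem.Int.toChars p.2 ++ pvAlt 2 (pvFlat rest))) = _
    rw [alt_even rest 2 rfl]
    rw [PySem.Chars.join, List.map_cons, intercalate_cons_flatMap]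
    simp [List.flatMap_map]

-- ===== VERDICT (by name: the statement is the Claim_ definition above) =====
theorem convert_to_jupyter_ray_input_spec : Claim_equal_convert_to_jupyter_ray_input := by
  intro rays _
  unfold Spec_convert_to_jupyter_ray_input
  exact pv_main rays
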